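-- pv_equiv track=rewrite | github.com/SUNLIFAN/CS61A | projects/cats/cats.py | sphinx_swap
-- ===== SOURCE A (Python) =====
-- def sphinx_swap(start, goal, limit):
--     """A diff function for autocorrect that determines how many letters
--     in START need to be substituted to create GOAL, then adds the difference in
--     their lengths.
--     """
--     # BEGIN PROBLEM 6
--     len_gap = abs(len(start)-len(goal))
--     min_len = min(len(start),len(goal))
--     if len_gap > limit:
--         return limit+1
--     elif (len(start) == 0) or (len(goal) == 0):
--         return len_gap
--     else:
--         if start[0] == goal[0]:
--             return sphinx_swap(start[1:min_len],goal[1:min_len],limit) + len_gap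
--         else:
--             return sphinx_swap(start[1:min_len],goal[1:min_len],limit-1) + len_gap +1
-- ===== SOURCE B (Python) =====
-- def sphinx_swap(start, goal, limit):
--     """Single-pass mismatch count over zip, capped arithmetically, plus the length gap."""
--     len_gap = abs(len(start) - len(goal))
--     if len_gap > limit:
--         return limit + 1
--     mismatches = sum(1 for a, b in zip(start, goal) if a != b)
--     return min(mismatches, limit + 1) + len_gap
-- ===== Notes on version B (the rewrite author's own statement) =====
-- stated objective: faster
-- what changed: Replaces the character-peeling recursion with a decrementing budget by one flat zip pass counting all mismatches, then an arithmetic cap min(m, limit+1) plus the length gap.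
import Mathlib
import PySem

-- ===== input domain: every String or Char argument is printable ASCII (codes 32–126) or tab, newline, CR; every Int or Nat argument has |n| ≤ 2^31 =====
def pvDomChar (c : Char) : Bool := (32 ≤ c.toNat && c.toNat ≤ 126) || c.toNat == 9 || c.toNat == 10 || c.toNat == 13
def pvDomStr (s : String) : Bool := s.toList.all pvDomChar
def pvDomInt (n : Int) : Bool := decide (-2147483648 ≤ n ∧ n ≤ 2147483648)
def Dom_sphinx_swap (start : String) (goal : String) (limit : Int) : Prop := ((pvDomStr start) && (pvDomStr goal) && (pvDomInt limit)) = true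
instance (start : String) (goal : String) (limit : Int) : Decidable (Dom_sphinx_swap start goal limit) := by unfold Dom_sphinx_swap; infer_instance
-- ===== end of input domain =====

-- B replaces A's character-peeling recursion by one zip pass counting mismatches plus an arithmetic cap: simpler, no recursion.


-- ===== PORT A =====
-- A's recursion, step for step, on the char lists (Python strings handled as their character sequences; exact).
def sphinxRec (s g : List Char) (limit : Int) : Int :=
  let len_gap : Int := |(s.length : Int) - (g.length : Int)|
  let min_len : Nat := min s.length g.length
  if len_gap > limit then limit + 1
  else if s.length = 0 ∨ g.length = 0 then len_gap
  else if PySem.List.pyGet? s 0 = PySem.List.pyGet? g 0 then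
    sphinxRec (PySem.List.slice s (some 1) (some (min_len : Int)))
              (PySem.List.slice g (some 1) (some (min_len : Int))) limit + len_gap
  else
    sphinxRec (PySem.List.slice s (some 1) (some (min_len : Int)))
              (PySem.List.slice g (some 1) (some (min_len : Int))) (limit - 1) + len_gap + 1
termination_by s.length
decreasing_by
  all_goals
    simp only [PySem.List.slice]
    cases s with
    | nil => simp_all
    | cons a t => simp [List.length_take]

def sphinx_swap (start : String) (goal : String) (limit : Int) : Int :=
  sphinxRec start.toList goal.toList limit

-- ===== PORT B =====
def sphinx_swap_alt (start : String) (goal : String) (limit : Int) : Int :=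
  let len_gap : Int := |(start.toList.length : Int) - (goal.toList.length : Int)|
  if len_gap > limit then limit + 1
  else
    let mismatches : Int :=
      (start.toList.zip goal.toList).foldl (fun acc p => if p.1 ≠ p.2 then acc + 1 else acc) 0
    min mismatches (limit + 1) + len_gap

-- ===== PRECONDITION & SPEC =====
def Spec_sphinx_swap (start : String) (goal : String) (limit : Int) (out : Int) : Prop := out = sphinx_swap_alt start goal limit
instance (start : String) (goal : String) (limit : Int) (out : Int) : Decidable (Spec_sphinx_swap start goal limit out) := by unfold Spec_sphinx_swap; infer_instance

-- ===== CLAIM (what is proved, stated in full; the proofs are below) =====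
def Claim_equal_sphinx_swap : Prop := ∀ (start : String) (goal : String) (limit : Int), Dom_sphinx_swap start goal limit → Spec_sphinx_swap start goal limit (sphinx_swap start goal limit)

-- ===== LEMMAS AND PROOFS =====

-- mismatch count of a zipped list (proof-side view of B's fold)
def mism : List (Char × Char) → Int
  | [] => 0
  | p :: t => (if p.1 ≠ p.2 then 1 else 0) + mism t

lemma mism_foldl (l : List (Char × Char)) : ∀ c : Int,
    l.foldl (fun acc p => if p.1 ≠ p.2 then acc + 1 else acc) c = c + mism l := by
  induction l with
  | nil => intro c; simp [mism]
  | cons p t ih =>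
    intro c
    rw [List.foldl_cons, ih]
    by_cases h : p.1 = p.2 <;> (simp [mism, h]; try omega)

lemma mism_nonneg (l : List (Char × Char)) : 0 ≤ mism l := by
  induction l with
  | nil => simp [mism]
  | cons p t ih => simp only [mism]; split_ifs <;> omega

-- Characterisation of A's recursion: the capped mismatch count plus the length gap.
lemma sphinxRec_eq (n : Nat) : ∀ (s g : List Char) (limit : Int), s.length ≤ n →
    sphinxRec s g limit =
      if |(s.length : Int) - (g.length : Int)| > limit then limit + 1
      else min (mism (s.zip g)) (limit + 1) + |(s.length : Int) - (g.length : Int)| := by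
  induction n with
  | zero =>
    intro s g limit hs
    have hs0 : s = [] := List.eq_nil_of_length_eq_zero (Nat.le_zero.mp hs)
    subst hs0
    rw [sphinxRec]
    have hz : (([] : List Char)).zip g = [] := rfl
    simp only [hz, List.length_nil, true_or, if_true, mism, Nat.cast_zero, zero_sub, abs_neg,
      abs_of_nonneg (by positivity : (0:Int) ≤ (g.length:Int))]
    split_ifs with h
    · rfl
    · omega
  | succ n ih =>
    intro s g limit hs
    rw [sphinxRec]
    by_cases h1 : |(s.length : Int) - (g.length : Int)| > limit
    · simp [h1]
    · simp only [if_neg h1]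
      by_cases h2 : s.length = 0 ∨ g.length = 0
      · have hz : s.zip g = [] := by
          rcases h2 with h | h
          · simp [List.eq_nil_of_length_eq_zero h]
          · simp [List.eq_nil_of_length_eq_zero h]
        simp only [if_pos h2, hz, mism]
        have hg : (0:Int) ≤ |(s.length : Int) - (g.length : Int)| := abs_nonneg _
        omega
      · simp only [if_neg h2]
        push Not at h2
        obtain ⟨a, s₀, rfl⟩ : ∃ a t, s = a :: t := by
          cases s with | nil => simp at h2 | cons a t => exact ⟨a, t, rfl⟩
        obtain ⟨b, g₀, rfl⟩ : ∃ b t, g = b :: t := by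
          cases g with | nil => simp at h2 | cons b t => exact ⟨b, t, rfl⟩
        set k := min s₀.length g₀.length with hk
        have hml : ((min (a::s₀).length (b::g₀).length : Nat) : Int) = ((1:Nat):Int) + ((k:Nat):Int) := by
          simp only [hk, List.length_cons]
          push_cast
          omega
        have hslice_s : PySem.List.slice (a :: s₀) (some 1) (some ((min (a::s₀).length (b::g₀).length : Nat) : Int)) = s₀.take k := by
          rw [show (some ((min (a::s₀).length (b::g₀).length : Nat) : Int)) = some (((1:Nat):Int) + ((k:Nat):Int)) by rw [hml],
              show (some (1:Int)) = some (((1:Nat):Int)) by norm_num,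
              PySem.List.slice_natCast_add]
          simp
        have hslice_g : PySem.List.slice (b :: g₀) (some 1) (some ((min (a::s₀).length (b::g₀).length : Nat) : Int)) = g₀.take k := by
          rw [show (some ((min (a::s₀).length (b::g₀).length : Nat) : Int)) = some (((1:Nat):Int) + ((k:Nat):Int)) by rw [hml],
              show (some (1:Int)) = some (((1:Nat):Int)) by norm_num,
              PySem.List.slice_natCast_add]
          simp
        have hlen_s : (s₀.take k).length = k := by simp [hk]
        have hlen_g : (g₀.take k).length = k := by simp [hk]
        have hzip : (s₀.take k).zip (g₀.take k) = s₀.zip g₀ := by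
          have ht : (s₀.zip g₀).take k = (s₀.take k).zip (g₀.take k) := by
            simp [List.zip, List.take_zipWith]
          rw [← ht]
          exact List.take_of_length_le (by simp [List.zip, hk])
        have hrec : ∀ l : Int, sphinxRec (s₀.take k) (g₀.take k) l =
            if (0:Int) > l then l + 1 else min (mism (s₀.zip g₀)) (l + 1) := by
          intro l
          rw [ih (s₀.take k) (g₀.take k) l (by simp [hk]; omega)]
          rw [hlen_s, hlen_g]
          simp [hzip]
        have hget : (PySem.List.pyGet? (a :: s₀) 0 = PySem.List.pyGet? (b :: g₀) 0) ↔ a = b := by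
          simp [PySem.List.pyGet?, PySem.List.pyIdx?]
        have hm := mism_nonneg (s₀.zip g₀)
        have hzc : mism ((a :: s₀).zip (b :: g₀)) = (if a ≠ b then 1 else 0) + mism (s₀.zip g₀) := rfl
        have hgap : (0:Int) ≤ |((a :: s₀).length : Int) - ((b :: g₀).length : Int)| := abs_nonneg _
        have hlim : |((a :: s₀).length : Int) - ((b :: g₀).length : Int)| ≤ limit := by omega
        by_cases hab : a = b
        · rw [if_pos (hget.mpr hab), hslice_s, hslice_g, hrec, hzc]
          simp only [hab, ne_eq, not_true_eq_false, if_false]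
          split_ifs with h3 <;> omega
        · rw [if_neg (fun h => hab (hget.mp h)), hslice_s, hslice_g, hrec, hzc]
          simp only [ne_eq, hab, not_false_eq_true, if_true]
          split_ifs with h3 <;> omega

-- ===== VERDICT (by name: the statement is the Claim_ definition above) =====
theorem sphinx_swap_spec : Claim_equal_sphinx_swap := by
  intro start goal limit _
  unfold Spec_sphinx_swap sphinx_swap sphinx_swap_alt
  rw [sphinxRec_eq start.toList.length start.toList goal.toList limit le_rfl]
  have hm : (start.toList.zip goal.toList).foldl
      (fun acc p => if p.1 ≠ p.2 then acc + 1 else acc) 0 = mism (start.toList.zip goal.toList) := by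
    rw [mism_foldl]; omega
  simp only [hm]
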